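-- pv_equiv track=rewrite | github.com/Gardain/FIO_NER | src/sts_fio_mvp/postprocess.py | _word_tokens
-- ===== SOURCE A (Python) =====
-- def _word_tokens(value: str) -> list[str]:
--     tokens: list[str] = []
--     current: list[str] = []
--     for char in value:
--         if char.isalpha() or char == "-":
--             current.append(char)
--         else:
--             if current:
--                 tokens.append("".join(current).strip("-"))
--                 current.clear()
--     if current:
--         tokens.append("".join(current).strip("-"))
--     return [token for token in tokens if token]
-- ===== SOURCE B (Python) =====
-- def _word_tokens(value: str) -> list[str]:
--     # Two-pointer run extraction: scan an index, slice out each maximal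
--     # run of letters/hyphens, strip hyphens, keep non-empty tokens.
--     tokens: list[str] = []
--     i, n = 0, len(value)
--     while i < n:
--         if value[i].isalpha() or value[i] == "-":
--             j = i + 1
--             while j < n and (value[j].isalpha() or value[j] == "-"):
--                 j += 1
--             token = value[i:j].strip("-")
--             if token:
--                 tokens.append(token)
--             i = j
--         else:
--             i += 1
--     return tokens
-- ===== Notes on version B (the rewrite author's own statement) =====
-- stated objective: alternative
-- what changed: Replaced the per-character accumulator with flush-on-delimiter and post-loop flush plus a final filtering comprehension by two-pointer extraction of maximal letter/hyphen runs via slicing, appending each stripped token immediately if non-empty.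
import Mathlib
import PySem

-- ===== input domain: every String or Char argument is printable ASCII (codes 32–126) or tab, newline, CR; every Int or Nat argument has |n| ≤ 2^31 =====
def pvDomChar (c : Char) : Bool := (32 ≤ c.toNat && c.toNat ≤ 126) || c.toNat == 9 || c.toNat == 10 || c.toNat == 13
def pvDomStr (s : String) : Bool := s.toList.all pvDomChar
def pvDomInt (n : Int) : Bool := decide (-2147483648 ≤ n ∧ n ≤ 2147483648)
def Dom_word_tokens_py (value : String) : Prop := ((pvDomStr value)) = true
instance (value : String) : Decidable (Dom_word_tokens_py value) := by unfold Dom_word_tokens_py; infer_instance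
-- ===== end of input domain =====

-- B replaces A's accumulator-with-flush loop by two-pointer extraction of maximal
-- letter/hyphen runs (alternative decomposition, same cost).

-- ===== PORT A =====
-- char.isalpha() or char == "-"
def pvIsW (c : Char) : Bool := PySem.Chars.isalpha c || (c == '-')

-- "".join(current).strip("-")  (Chars.stripChars is exact for str.strip(chars))
def pvFlushTok (cur : List Char) : String := String.ofList (PySem.Chars.stripChars cur ['-'])

-- one iteration of A's for-loop over (tokens, current)
def pvAStep (st : List String × List Char) (c : Char) : List String × List Char :=
  if pvIsW c then (st.1, st.2 ++ [c])
  else if st.2 ≠ [] then (st.1 ++ [pvFlushTok st.2], []) else st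

-- the post-loop flush
def pvAFin (st : List String × List Char) : List String :=
  if st.2 ≠ [] then st.1 ++ [pvFlushTok st.2] else st.1

-- [token for token in tokens if token]
def pvFilterNE (ts : List String) : List String := ts.filter (fun t => !(t == ""))

def word_tokens_py (value : String) : List String :=
  pvFilterNE (pvAFin (value.toList.foldl pvAStep ([], [])))

-- ===== PORT B =====
-- B's outer while-loop: each step consumes the maximal letter/hyphen run
-- (value[i:j], found by the inner while = takeWhile/dropWhile) or one other char.
def pvAltGo (l : List Char) : List String :=
  match l with
  | [] => []
  | c :: rest =>
    if pvIsW c then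
      let tok := PySem.Chars.stripChars (c :: rest.takeWhile pvIsW) ['-']
      (if tok = [] then [] else [String.ofList tok]) ++ pvAltGo (rest.dropWhile pvIsW)
    else pvAltGo rest
termination_by l.length
decreasing_by
  · exact Nat.lt_succ_of_le (List.length_dropWhile_le _ _)
  · simp

def word_tokens_py_alt (value : String) : List String := pvAltGo value.toList

-- ===== PRECONDITION & SPEC =====
def Spec_word_tokens_py (value : String) (out : List String) : Prop := out = word_tokens_py_alt value
instance (value : String) (out : List String) : Decidable (Spec_word_tokens_py value out) := by unfold Spec_word_tokens_py; infer_instance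

-- ===== CLAIM (what is proved, stated in full; the proofs are below) =====
def Claim_equal_word_tokens_py : Prop := ∀ (value : String), Dom_word_tokens_py value → Spec_word_tokens_py value (word_tokens_py value)

-- ===== LEMMAS AND PROOFS =====

theorem pv_takeWhile_append (p : Char → Bool) (cur rest : List Char)
    (h : ∀ c ∈ cur, p c = true) :
    (cur ++ rest).takeWhile p = cur ++ rest.takeWhile p := by
  induction cur with
  | nil => simp
  | cons c cs ih =>
    simp only [List.cons_append, List.takeWhile_cons, h c (by simp)]
    simp [ih (fun x hx => h x (by simp [hx]))]

theorem pv_dropWhile_append (p : Char → Bool) (cur rest : List Char)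
    (h : ∀ c ∈ cur, p c = true) :
    (cur ++ rest).dropWhile p = rest.dropWhile p := by
  induction cur with
  | nil => simp
  | cons c cs ih =>
    simp only [List.cons_append, List.dropWhile_cons, h c (by simp)]
    exact ih (fun x hx => h x (by simp [hx]))

theorem pv_dropWhile_eq_self (p : Char → Bool) (rest : List Char)
    (h : rest.takeWhile p = []) : rest.dropWhile p = rest := by
  cases rest with
  | nil => rfl
  | cons a l =>
    simp only [List.takeWhile_cons] at h
    cases hp : p a with
    | true => simp [hp] at h
    | false => simp [hp]

-- pvAltGo on a non-empty all-word block followed by a list whose head is not a word char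
theorem pv_altGo_block (c : Char) (cs rest : List Char)
    (hall : ∀ x ∈ c :: cs, pvIsW x = true) (hrest : rest.takeWhile pvIsW = []) :
    pvAltGo (c :: cs ++ rest) =
      (if PySem.Chars.stripChars (c :: cs) ['-'] = [] then []
       else [String.ofList (PySem.Chars.stripChars (c :: cs) ['-'])]) ++ pvAltGo rest := by
  have hc : pvIsW c = true := hall c (by simp)
  have hcs : ∀ x ∈ cs, pvIsW x = true := fun x hx => hall x (by simp [hx])
  rw [pvAltGo.eq_def]
  simp only [List.cons_append, hc, if_true]
  rw [pv_takeWhile_append pvIsW cs rest hcs, hrest,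
      pv_dropWhile_append pvIsW cs rest hcs, pv_dropWhile_eq_self pvIsW rest hrest]
  simp

theorem pv_main (l cur : List Char) (tokens : List String)
    (hcur : ∀ c ∈ cur, pvIsW c = true) :
    pvFilterNE (pvAFin (l.foldl pvAStep (tokens, cur))) =
      pvFilterNE tokens ++ pvAltGo (cur ++ l) := by
  induction l generalizing cur tokens with
  | nil =>
    simp only [List.foldl_nil, List.append_nil]
    cases cur with
    | nil => simp [pvAFin, pvAltGo, pvFilterNE]
    | cons c cs =>
      have hblock := pv_altGo_block c cs [] hcur (by simp)
      simp only [List.append_nil] at hblock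
      rw [hblock]
      simp only [pvAFin, ne_eq, reduceCtorEq, not_false_eq_true, if_true,
        pvFilterNE, List.filter_append, pvFlushTok]
      rw [show pvAltGo [] = [] by rw [pvAltGo.eq_def]]
      congr 1
      by_cases hz : PySem.Chars.stripChars (c :: cs) ['-'] = [] <;> simp [hz]
  | cons a l ih =>
    simp only [List.foldl_cons]
    by_cases ha : pvIsW a = true
    · rw [show pvAStep (tokens, cur) a = (tokens, cur ++ [a]) by simp [pvAStep, ha]]
      rw [ih (cur ++ [a]) tokens
          (fun x hx => by rcases List.mem_append.mp hx with h | h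
                          · exact hcur x h
                          · simp at h; simp [h, ha])]
      simp
    · have ha' : pvIsW a = false := by simpa using ha
      cases cur with
      | nil =>
        rw [show pvAStep (tokens, []) a = (tokens, []) by simp [pvAStep, ha']]
        rw [ih [] tokens (by simp)]
        simp [pvAltGo, ha']
      | cons c cs =>
        rw [show pvAStep (tokens, c :: cs) a = (tokens ++ [pvFlushTok (c :: cs)], []) by
              simp [pvAStep, ha']]
        rw [ih [] (tokens ++ [pvFlushTok (c :: cs)]) (by simp)]
        have hblock := pv_altGo_block c cs (a :: l) hcur (by simp [ha'])
        rw [show (c :: cs) ++ (a :: l) = c :: cs ++ (a :: l) by simp] at *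
        rw [hblock]
        rw [show pvAltGo (a :: l) = pvAltGo l by rw [pvAltGo.eq_def]; simp [ha']]
        simp only [pvFilterNE, List.filter_append, pvFlushTok]
        rw [List.append_assoc]
        congr 1
        by_cases hz : PySem.Chars.stripChars (c :: cs) ['-'] = [] <;> simp [hz]

-- ===== VERDICT (by name: the statement is the Claim_ definition above) =====
theorem word_tokens_py_spec : Claim_equal_word_tokens_py := by
  intro value _
  unfold Spec_word_tokens_py word_tokens_py word_tokens_py_alt
  have := pv_main value.toList [] [] (by intro c hc; exact absurd hc (by simp))
  simp only [List.nil_append] at this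
  rw [this, pvFilterNE]
  simp
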